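-- pv_equiv track=rewrite | github.com/ufkapano/graphtheory | graphtheory/chordality/intervaltools.py | make_tepee_interval
-- ===== SOURCE A (Python) =====
-- def swap(L, i, j):
--     L[i], L[j] = L[j], L[i]
--
-- def make_tepee_interval(n):
--     """Return a tepee interval graph as double perm."""
--     if n < 2:
--         raise ValueError("n has to be greater than 1")
--     perm = [n-1]
--     for i in range(n-1):
--         perm.extend((i, i))
--     for i in range(2, 2*n-2, 2):
--         swap(perm, i, i+1)
--     perm.append(n-1)
--     return perm
-- ===== SOURCE B (Python) =====
-- def make_tepee_interval(n):
--     """Return a tepee interval graph as double perm."""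
--     if n < 2:
--         raise ValueError("n has to be greater than 1")
--     perm = [n - 1, 0]
--     for m in range(1, n - 1):
--         perm.append(m)
--         perm.append(m - 1)
--     perm.append(n - 2)
--     perm.append(n - 1)
--     return perm
-- ===== Notes on version B (the rewrite author's own statement) =====
-- stated objective: simpler
-- what changed: B emits the final double-perm directly in one pass (append m then m-1 for each middle m, plus fixed endpoints) instead of A's two phases of building a doubled sequence and then permuting it with adjacent swaps via a swap helper.
import Mathlib
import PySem

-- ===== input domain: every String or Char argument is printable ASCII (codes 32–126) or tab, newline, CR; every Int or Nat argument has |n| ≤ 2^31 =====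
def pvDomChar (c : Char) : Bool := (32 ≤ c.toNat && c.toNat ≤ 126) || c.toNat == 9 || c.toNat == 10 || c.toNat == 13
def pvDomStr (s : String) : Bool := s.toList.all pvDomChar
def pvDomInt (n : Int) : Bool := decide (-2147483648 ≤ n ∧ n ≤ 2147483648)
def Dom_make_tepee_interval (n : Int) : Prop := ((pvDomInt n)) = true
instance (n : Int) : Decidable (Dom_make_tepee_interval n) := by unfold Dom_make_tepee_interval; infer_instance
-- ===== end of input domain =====

-- B builds the final double-perm directly in one pass instead of A's build-doubled-sequence-then-adjacent-swap phases (objective: simpler).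

-- ===== PORT A =====
-- swap(L, i, j): L[i], L[j] = L[j], L[i].  Reads both, then writes both.
-- Exact for the nonnegative in-range indices this program passes (pyGet? = Python indexing;
-- on index error the Python would raise — unreachable here, the fallback keeps the function total).
def pySwap (L : List Int) (i j : Int) : List Int :=
  match PySem.List.pyGet? L i, PySem.List.pyGet? L j with
  | some a, some b => (L.set i.toNat b).set j.toNat a
  | _, _ => L

def make_tepee_interval (n : Int) : List Int :=
  if n < 2 then []  -- Python raises ValueError here; excluded by Pre_
  else
    ((PySem.List.pyRange 2 (2*n-2) 2).foldl (fun acc i => pySwap acc i (i+1))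
        ((PySem.List.pyRange 0 (n-1) 1).foldl (fun acc i => acc ++ [i, i]) [n-1]))
      ++ [n-1]

-- ===== PORT B =====
def make_tepee_interval_alt (n : Int) : List Int :=
  if n < 2 then []  -- Python raises ValueError here; excluded by Pre_
  else
    ((PySem.List.pyRange 1 (n-1) 1).foldl (fun acc m => acc ++ [m, m-1]) [n-1, 0]) ++ [n-2, n-1]

-- ===== PRECONDITION & SPEC =====
-- Pre_ excludes exactly n < 2, where the Python A (and B) raise ValueError.
def Pre_make_tepee_interval (n : Int) : Prop := 2 ≤ n
instance (n : Int) : Decidable (Pre_make_tepee_interval n) := by unfold Pre_make_tepee_interval; infer_instance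
def pvWitness_make_tepee_interval : Int := (5)

def Spec_make_tepee_interval (n : Int) (out : List Int) : Prop := out = make_tepee_interval_alt n
instance (n : Int) (out : List Int) : Decidable (Spec_make_tepee_interval n out) := by unfold Spec_make_tepee_interval; infer_instance

-- ===== CLAIM (what is proved, stated in full; the proofs are below) =====
def Claim_equal_make_tepee_interval : Prop := ∀ (n : Int), Dom_make_tepee_interval n → Pre_make_tepee_interval n → Spec_make_tepee_interval n (make_tepee_interval n)

-- ===== LEMMAS AND PROOFS =====

-- the doubled middle sequence A's first phase appends: 0,0,1,1,…,m-1,m-1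
def pvFlat (m : Nat) : List Int := (List.range m).flatMap (fun i : Nat => [(i : Int), (i : Int)])

-- the swapped middle sequence both programs end with: 1,0,2,1,…,k,k-1
def pvMid (k : Nat) : List Int := (List.range k).flatMap (fun j : Nat => [(j : Int) + 1, (j : Int)])

theorem pvFlat_succ (m : Nat) : pvFlat (m+1) = pvFlat m ++ [(m : Int), (m : Int)] := by
  simp [pvFlat, List.range_succ]

theorem pvMid_succ (k : Nat) : pvMid (k+1) = pvMid k ++ [(k : Int) + 1, (k : Int)] := by
  simp [pvMid, List.range_succ]

theorem length_pvFlat (m : Nat) : (pvFlat m).length = 2 * m := by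
  induction m with
  | zero => rfl
  | succ m ih => simp [pvFlat_succ, ih]; omega

theorem length_pvMid (k : Nat) : (pvMid k).length = 2 * k := by
  induction k with
  | zero => rfl
  | succ k ih => simp [pvMid_succ, ih]; omega

theorem length_pySwap (L : List Int) (i j : Int) : (pySwap L i j).length = L.length := by
  unfold pySwap
  cases PySem.List.pyGet? L i <;> cases PySem.List.pyGet? L j <;> simp

theorem pyGet?_append_left (L M : List Int) (i : Int) (h0 : 0 ≤ i) (h1 : i < L.length) :
    PySem.List.pyGet? (L ++ M) i = PySem.List.pyGet? L i := by
  simp only [PySem.List.pyGet?, PySem.List.pyIdx?, List.length_append]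
  rw [if_pos h0, if_pos h0, if_pos (by push_cast; omega), if_pos (by exact_mod_cast h1)]
  simp only [Option.bind_some]
  exact List.getElem?_append_left (by omega)

theorem pySwap_append (L M : List Int) (i j : Int)
    (h0 : 0 ≤ i) (h1 : i < L.length) (h2 : 0 ≤ j) (h3 : j < L.length) :
    pySwap (L ++ M) i j = pySwap L i j ++ M := by
  unfold pySwap
  rw [pyGet?_append_left L M i h0 h1, pyGet?_append_left L M j h2 h3]
  cases hi : PySem.List.pyGet? L i <;> cases hj : PySem.List.pyGet? L j <;> simp
  rw [List.set_append, if_pos (by omega), List.set_append, if_pos (by simp; omega)]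

-- folding in-prefix swaps over L ++ M touches only L
theorem swapfold_append (S : List Int) (L M : List Int)
    (hS : ∀ i ∈ S, 0 ≤ i ∧ i + 1 < L.length) :
    S.foldl (fun acc i => pySwap acc i (i+1)) (L ++ M)
      = (S.foldl (fun acc i => pySwap acc i (i+1)) L) ++ M := by
  induction S generalizing L M with
  | nil => rfl
  | cons a S ih =>
    have ha := hS a (List.mem_cons_self)
    simp only [List.foldl_cons]
    rw [pySwap_append L M a (a+1) ha.1 (by exact_mod_cast by omega) (by omega) (by exact_mod_cast ha.2)]
    exact ih _ _ (fun i hi => by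
      have := hS i (List.mem_cons_of_mem _ hi)
      simpa [length_pySwap] using this)

-- swapping the two elements straddling position |A| in A ++ x :: y :: R
theorem pySwap_at_junction (A : List Int) (x y : Int) (R : List Int) :
    pySwap (A ++ x :: y :: R) (A.length) ((A.length : Int) + 1) = A ++ y :: x :: R := by
  have hx : PySem.List.pyGet? (A ++ x :: y :: R) (A.length : Int) = some x := by
    simp only [PySem.List.pyGet?, PySem.List.pyIdx?, List.length_append, List.length_cons]
    rw [if_pos (by positivity), if_pos (by push_cast; omega)]
    simp
  have hy : PySem.List.pyGet? (A ++ x :: y :: R) ((A.length : Int) + 1) = some y := by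
    simp only [PySem.List.pyGet?, PySem.List.pyIdx?, List.length_append, List.length_cons]
    rw [if_pos (by positivity), if_pos (by push_cast; omega)]
    have : ((A.length : Int) + 1).toNat = A.length + 1 := by omega
    rw [this]
    simp
  unfold pySwap
  rw [hx, hy]
  simp only []
  have h1 : ((A.length : Int)).toNat = A.length := by omega
  have h2 : ((A.length : Int) + 1).toNat = A.length + 1 := by omega
  rw [h1, h2, List.set_append, if_neg (by omega), List.set_append, if_neg (by simp)]
  simp

-- A's swap phase, characterised: on h :: pvFlat (k+1) it yields h :: 0 :: pvMid k ++ [k]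
theorem swapfold_spec (k : Nat) (h : Int) :
    ((List.range k).map (fun j : Nat => 2 + 2 * (j : Int))).foldl
        (fun acc i => pySwap acc i (i+1)) (h :: pvFlat (k+1))
      = h :: 0 :: (pvMid k ++ [(k : Int)]) := by
  induction k with
  | zero => simp [pvFlat, pvMid]
  | succ k ih =>
    rw [List.range_succ, List.map_append, List.foldl_append]
    have hcons : h :: pvFlat (k+1+1) = (h :: pvFlat (k+1)) ++ [(k+1 : Int), (k+1 : Int)] := by
      rw [pvFlat_succ]; push_cast; simp
    rw [hcons, swapfold_append _ _ _ (by
      intro i hi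
      simp only [List.mem_map, List.mem_range] at hi
      obtain ⟨j, hj, rfl⟩ := hi
      constructor
      · omega
      · simp only [List.length_cons, length_pvFlat]; push_cast; omega), ih]
    have hform : (h :: 0 :: (pvMid k ++ [(k : Int)])) ++ [(k+1 : Int), (k+1 : Int)]
        = (h :: 0 :: pvMid k) ++ (k : Int) :: (k+1 : Int) :: [(k+1 : Int)] := by
      rw [List.cons_append, List.cons_append, List.append_assoc]; rfl
    simp only [List.map_cons, List.map_nil, List.foldl_cons, List.foldl_nil]
    rw [hform]
    have hlen : ((h :: 0 :: pvMid k).length : Int) = 2 + 2 * (k : Int) := by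
      simp [length_pvMid]; ring
    have := pySwap_at_junction (h :: 0 :: pvMid k) (k : Int) ((k : Int) + 1) [(k : Int) + 1]
    rw [hlen] at this
    push_cast
    rw [this, pvMid_succ]
    simp

theorem main_eq (n : Int) (hn : 2 ≤ n) : make_tepee_interval n = make_tepee_interval_alt n := by
  obtain ⟨k, hk⟩ : ∃ k : Nat, n = (k : Int) + 2 := ⟨(n - 2).toNat, by omega⟩
  subst hk
  unfold make_tepee_interval make_tepee_interval_alt
  rw [if_neg (by omega), if_neg (by omega)]
  rw [PySem.List.foldl_append_eq_flatMap, PySem.List.foldl_append_eq_flatMap]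
  -- A's first phase appends the doubled sequence pvFlat (k+1)
  have hflat : (PySem.List.pyRange 0 ((k : Int) + 2 - 1) 1).flatMap (fun i => [i, i]) = pvFlat (k+1) := by
    rw [show ((k : Int) + 2 - 1) = ((k : Int) + 1) by ring, PySem.List.pyRange_zero]
    rw [show ((k : Int) + 1).toNat = k + 1 by omega, List.flatMap_map]
    rfl
  -- A's swap range is the positions 2, 4, …, 2k
  have hrange : PySem.List.pyRange 2 (2 * ((k : Int) + 2) - 2) 2
      = (List.range k).map (fun j : Nat => 2 + 2 * (j : Int)) := by
    rw [PySem.List.pyRange_of_pos _ _ (by norm_num)]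
    have hc : (if (2:Int) < 2 * ((k:Int)+2) - 2
        then ((2 * ((k:Int)+2) - 2 - 2 + 2 - 1) / 2).toNat else 0) = k := by
      split <;> omega
    rw [hc]
  -- B's middle loop appends pvMid k
  have hmid : (PySem.List.pyRange 1 ((k : Int) + 2 - 1) 1).flatMap (fun m => [m, m - 1]) = pvMid k := by
    rw [show ((k : Int) + 2 - 1) = ((k : Int) + 1) by ring, PySem.List.pyRange_one]
    rw [show ((k : Int) + 1 - 1).toNat = k by omega]
    rw [List.flatMap_map]
    unfold pvMid
    apply List.flatMap_congr
    intro j _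
    show [1 + (j:Int), 1 + (j:Int) - 1] = [(j:Int) + 1, (j:Int)]
    congr 1
    · ring
    · congr 1; ring
  rw [hflat, hrange, hmid]
  have hcons : ([(k : Int) + 2 - 1] : List Int) ++ pvFlat (k+1) = ((k : Int) + 2 - 1) :: pvFlat (k+1) := by simp
  rw [hcons, swapfold_spec k ((k : Int) + 2 - 1)]
  simp

-- ===== VERDICT (by name: the statement is the Claim_ definition above) =====
theorem make_tepee_interval_spec : Claim_equal_make_tepee_interval := by
  intro n _ hpre
  unfold Spec_make_tepee_interval
  exact main_eq n hpre
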